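-- pv_equiv track=rewrite | github.com/google/automl | efficientdet/utils.py | get_feat_sizes
-- ===== SOURCE A (Python) =====
-- from typing import Text, Tuple, Union
--
-- def get_feat_sizes(image_size: Union[int, Tuple[int, int]], max_level: int):
--   """Get feat widths and heights for all levels."""
--   if isinstance(image_size, int):
--     image_size = (image_size, image_size)
--   feat_sizes = [{'height': image_size[0], 'width': image_size[1]}]
--   feat_size = image_size
--   for _ in range(1, max_level + 1):
--     feat_size = ((feat_size[0] - 1) // 2 + 1, (feat_size[1] - 1) // 2 + 1)
--     feat_sizes.append({'height': feat_size[0], 'width': feat_size[1]})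
--   return feat_sizes
-- ===== SOURCE B (Python) =====
-- def get_feat_sizes(image_size, max_level):
--   """Get feat widths and heights for all levels."""
--   if isinstance(image_size, int):
--     image_size = (image_size, image_size)
--   h, w = image_size
--   feat_sizes = [{'height': h, 'width': w}]
--   for i in range(1, max_level + 1):
--     # Python's >> on int is an arithmetic shift: x >> i == x // 2**i exactly.
--     feat_sizes.append({'height': ((h - 1) >> i) + 1, 'width': ((w - 1) >> i) + 1})
--   return feat_sizes
-- ===== Notes on version B (the rewrite author's own statement) =====
-- stated objective: alternative
-- what changed: Each level's size is computed directly by a per-level closed form (dim-1)//2**i+1 instead of threading an accumulator that halves the previous level's size.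
import Mathlib
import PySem

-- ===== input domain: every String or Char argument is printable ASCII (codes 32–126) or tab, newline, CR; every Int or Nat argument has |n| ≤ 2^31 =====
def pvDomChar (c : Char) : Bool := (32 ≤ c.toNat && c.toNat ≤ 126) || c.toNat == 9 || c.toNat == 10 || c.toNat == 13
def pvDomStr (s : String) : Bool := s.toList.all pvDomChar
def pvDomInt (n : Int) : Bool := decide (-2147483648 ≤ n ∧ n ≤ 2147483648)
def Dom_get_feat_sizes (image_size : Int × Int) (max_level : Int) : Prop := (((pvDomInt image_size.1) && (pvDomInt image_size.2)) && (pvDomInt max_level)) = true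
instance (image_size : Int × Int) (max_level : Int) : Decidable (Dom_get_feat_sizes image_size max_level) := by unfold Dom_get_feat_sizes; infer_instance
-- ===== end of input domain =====

-- B replaces A's accumulator-threaded successive halving by a per-level closed form
-- (dim-1)//2**i+1; same cost, different decomposition (alternative).

-- ===== PORT A =====
def get_feat_sizes (image_size : Int × Int) (max_level : Int) : List (List (String × Int)) :=
  let init : List (List (String × Int)) × (Int × Int) :=
    ([[("height", image_size.1), ("width", image_size.2)]], image_size)
  let r := (PySem.List.pyRange 1 (max_level + 1) 1).foldl
    (fun st _ =>
      let fs : Int × Int :=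
        (PySem.Int.floordiv (st.2.1 - 1) 2 + 1, PySem.Int.floordiv (st.2.2 - 1) 2 + 1)
      (st.1 ++ [[("height", fs.1), ("width", fs.2)]], fs)) init
  r.1

-- ===== PORT B =====
-- hand-ported construct: Python's `x >> i` on int is an arithmetic (floor) shift,
-- exactly floor division by 2^i; ported as PySem.Int.floordiv _ (2 ^ i.toNat) (i ≥ 1 here).
def get_feat_sizes_alt (image_size : Int × Int) (max_level : Int) : List (List (String × Int)) :=
  [[("height", image_size.1), ("width", image_size.2)]] ++
  (PySem.List.pyRange 1 (max_level + 1) 1).map (fun i =>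
    [("height", PySem.Int.floordiv (image_size.1 - 1) (2 ^ i.toNat) + 1),
     ("width",  PySem.Int.floordiv (image_size.2 - 1) (2 ^ i.toNat) + 1)])

-- ===== PRECONDITION & SPEC =====
def Spec_get_feat_sizes (image_size : Int × Int) (max_level : Int) (out : List (List (String × Int))) : Prop := out = get_feat_sizes_alt image_size max_level
instance (image_size : Int × Int) (max_level : Int) (out : List (List (String × Int))) : Decidable (Spec_get_feat_sizes image_size max_level out) := by unfold Spec_get_feat_sizes; infer_instance

-- ===== CLAIM (what is proved, stated in full; the proofs are below) =====
def Claim_equal_get_feat_sizes : Prop := ∀ (image_size : Int × Int) (max_level : Int), Dom_get_feat_sizes image_size max_level → Spec_get_feat_sizes image_size max_level (get_feat_sizes image_size max_level)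

-- ===== LEMMAS AND PROOFS =====

-- floor division by 2 iterated: (a // 2^k) // 2 = a // 2^(k+1)
theorem pv_fdiv_step (a : Int) (k : Nat) :
    PySem.Int.floordiv (PySem.Int.floordiv a (2 ^ k)) 2 = PySem.Int.floordiv a (2 ^ (k + 1)) := by
  rw [PySem.Int.floordiv_eq_ediv_of_pos (a := a) (by positivity),
      PySem.Int.floordiv_eq_ediv_of_pos (by norm_num),
      PySem.Int.floordiv_eq_ediv_of_pos (a := a) (by positivity),
      Int.ediv_ediv_of_nonneg (by positivity), pow_succ]

-- main loop invariant, by induction on the number of iterations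
theorem pv_loop (h w : Int) (n : Nat) :
    (PySem.List.pyRange 1 (1 + (n : Int)) 1).foldl
      (fun (st : List (List (String × Int)) × (Int × Int)) _ =>
        let fs : Int × Int :=
          (PySem.Int.floordiv (st.2.1 - 1) 2 + 1, PySem.Int.floordiv (st.2.2 - 1) 2 + 1)
        (st.1 ++ [[("height", fs.1), ("width", fs.2)]], fs))
      ([[("height", h), ("width", w)]], (h, w))
    = ([[("height", h), ("width", w)]] ++
        (PySem.List.pyRange 1 (1 + (n : Int)) 1).map (fun i =>
          [("height", PySem.Int.floordiv (h - 1) (2 ^ i.toNat) + 1),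
           ("width",  PySem.Int.floordiv (w - 1) (2 ^ i.toNat) + 1)]),
       (PySem.Int.floordiv (h - 1) (2 ^ n) + 1, PySem.Int.floordiv (w - 1) (2 ^ n) + 1)) := by
  induction n with
  | zero =>
    simp [PySem.List.pyRange_one_eq_nil (by norm_num : (1:Int) ≤ 1)]
  | succ n ih =>
    have hsplit : PySem.List.pyRange 1 (1 + ((n + 1 : Nat) : Int)) 1
        = PySem.List.pyRange 1 (1 + (n : Int)) 1 ++ [1 + (n : Int)] := by
      rw [show (1 + ((n + 1 : Nat) : Int)) = (1 + (n : Int)) + 1 by push_cast; ring]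
      exact PySem.List.pyRange_one_succ_right (a := 1) (b := 1 + (n : Int)) (by omega)
    rw [hsplit, List.foldl_append, ih, List.map_append]
    have htn : (1 + (n : Int)).toNat = n + 1 := by omega
    simp only [List.foldl_cons, List.foldl_nil, List.map_cons, List.map_nil, htn]
    simp only [add_sub_cancel_right, pv_fdiv_step]
    simp

theorem pv_range_norm (max_level : Int) :
    PySem.List.pyRange 1 (max_level + 1) 1 = PySem.List.pyRange 1 (1 + (max_level.toNat : Int)) 1 := by
  by_cases hm : 0 ≤ max_level
  · congr 1; omega
  · rw [PySem.List.pyRange_one_eq_nil (by omega), PySem.List.pyRange_one_eq_nil (by omega)]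

-- ===== VERDICT (by name: the statement is the Claim_ definition above) =====
theorem get_feat_sizes_spec : Claim_equal_get_feat_sizes := by
  intro ⟨h, w⟩ max_level _
  unfold Spec_get_feat_sizes get_feat_sizes get_feat_sizes_alt
  simp only [pv_range_norm]
  rw [pv_loop h w max_level.toNat]
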